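-- pv_equiv track=rewrite | github.com/oscar-rebooted/shazoom | fingerprint-database-creator.py | create_fingerprint_pairs
-- ===== SOURCE A (Python) =====
-- def create_fingerprint_pairs(fingerprint, target_zone_frames):
--     pairs = []
--
--     # Sort peaks by time
--     sorted_peaks = sorted(fingerprint, key=lambda x: x[0])
--
--     # Create pairs
--     for i, anchor_point in enumerate(sorted_peaks):
--         anchor_time, anchor_freq = anchor_point
--
--         # Look at peaks within target zone
--         for j in range(i+1, len(sorted_peaks)):
--             target_point = sorted_peaks[j]
--             target_time, target_freq = target_point
--
--             # Check if the target point is within the target zone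
--             time_diff = target_time - anchor_time
--             if time_diff > target_zone_frames:
--                 break
--
--             # Create pair
--             pair = (anchor_freq, target_freq, time_diff)
--             pairs.append(pair)
--
--     return pairs, sorted_peaks
-- ===== SOURCE B (Python) =====
-- def _bisect_right(a, x):
--     # standard-library bisect.bisect_right algorithm (hand-written: A imports nothing)
--     lo, hi = 0, len(a)
--     while lo < hi:
--         mid = (lo + hi) // 2
--         if x < a[mid]:
--             hi = mid
--         else:
--             lo = mid + 1
--     return lo
--
--
-- def create_fingerprint_pairs(fingerprint, target_zone_frames):
--     sorted_peaks = sorted(fingerprint, key=lambda x: x[0])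
--     times = [t for t, _ in sorted_peaks]
--     pairs = []
--     for i, (anchor_time, anchor_freq) in enumerate(sorted_peaks):
--         end = _bisect_right(times, anchor_time + target_zone_frames)
--         for target_time, target_freq in sorted_peaks[i + 1:end]:
--             pairs.append((anchor_freq, target_freq, target_time - anchor_time))
--     return pairs, sorted_peaks
-- ===== Notes on version B (the rewrite author's own statement) =====
-- stated objective: alternative
-- what changed: Replaces A's inner scan-until-break over later peaks with a binary-search (bisect_right) boundary on a precomputed parallel times list followed by an unconditional slice pass per anchor.
import Mathlib
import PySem

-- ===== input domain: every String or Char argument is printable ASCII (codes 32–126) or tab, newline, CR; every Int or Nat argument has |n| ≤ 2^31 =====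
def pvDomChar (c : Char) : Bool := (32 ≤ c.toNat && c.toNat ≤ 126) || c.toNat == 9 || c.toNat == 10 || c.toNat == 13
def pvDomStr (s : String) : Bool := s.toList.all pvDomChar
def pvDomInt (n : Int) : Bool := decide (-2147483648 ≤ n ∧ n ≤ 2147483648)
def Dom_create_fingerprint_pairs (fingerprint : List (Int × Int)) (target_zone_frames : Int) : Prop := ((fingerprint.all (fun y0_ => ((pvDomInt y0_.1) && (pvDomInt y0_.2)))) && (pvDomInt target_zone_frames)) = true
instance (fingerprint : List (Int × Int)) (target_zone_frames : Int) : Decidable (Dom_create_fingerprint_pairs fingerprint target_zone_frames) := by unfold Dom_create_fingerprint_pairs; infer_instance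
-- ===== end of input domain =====

-- B replaces A's scan-until-break inner loop by a bisect_right boundary on a parallel
-- times list plus a slice (alternative decomposition; same asymptotic cost).

-- ===== PORT A =====
-- inner 'for j in range(i+1, len(sorted_peaks)): … if time_diff > target_zone_frames: break …'
-- as structural recursion over the suffix after the anchor (break = stop)
def pvInnerA (anchor_time anchor_freq target_zone_frames : Int) :
    List (Int × Int) → List (Int × Int × Int)
  | [] => []
  | (target_time, target_freq) :: rest =>
      let time_diff := target_time - anchor_time
      if time_diff > target_zone_frames then []
      else (anchor_freq, target_freq, time_diff) ::
            pvInnerA anchor_time anchor_freq target_zone_frames rest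

-- outer 'for i, anchor_point in enumerate(sorted_peaks)': each anchor with its suffix
def pvOuterA (target_zone_frames : Int) : List (Int × Int) → List (Int × Int × Int)
  | [] => []
  | (anchor_time, anchor_freq) :: rest =>
      pvInnerA anchor_time anchor_freq target_zone_frames rest ++
        pvOuterA target_zone_frames rest

def create_fingerprint_pairs (fingerprint : List (Int × Int)) (target_zone_frames : Int) :
    (List (Int × Int × Int)) × (List (Int × Int)) :=
  let sorted_peaks := PySem.List.sorted fingerprint (fun x => x.1) false
  (pvOuterA target_zone_frames sorted_peaks, sorted_peaks)

-- ===== PORT B =====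
-- Source B's hand-written _bisect_right is the standard bisect_right algorithm = the
-- prelude's primitive PySem.List.bisectRight
def create_fingerprint_pairs_alt (fingerprint : List (Int × Int)) (target_zone_frames : Int) :
    (List (Int × Int × Int)) × (List (Int × Int)) :=
  let sorted_peaks := PySem.List.sorted fingerprint (fun x => x.1) false
  let times := sorted_peaks.map (fun p => p.1)
  let pairs := (PySem.List.enumerate sorted_peaks 0).foldl (fun acc ip =>
      let e := PySem.List.bisectRight times (ip.2.1 + target_zone_frames)
      acc ++ (PySem.List.slice sorted_peaks (some (ip.1 + 1)) (some (e : Int))).map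
          (fun q => (ip.2.2, q.2, q.1 - ip.2.1))) []
  (pairs, sorted_peaks)

-- ===== PRECONDITION & SPEC =====
def Spec_create_fingerprint_pairs (fingerprint : List (Int × Int)) (target_zone_frames : Int) (out : (List (Int × Int × Int)) × (List (Int × Int))) : Prop := out = create_fingerprint_pairs_alt fingerprint target_zone_frames
instance (fingerprint : List (Int × Int)) (target_zone_frames : Int) (out : (List (Int × Int × Int)) × (List (Int × Int))) : Decidable (Spec_create_fingerprint_pairs fingerprint target_zone_frames out) := by unfold Spec_create_fingerprint_pairs; infer_instance

-- ===== CLAIM (what is proved, stated in full; the proofs are below) =====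
def Claim_equal_create_fingerprint_pairs : Prop := ∀ (fingerprint : List (Int × Int)) (target_zone_frames : Int), Dom_create_fingerprint_pairs fingerprint target_zone_frames → Spec_create_fingerprint_pairs fingerprint target_zone_frames (create_fingerprint_pairs fingerprint target_zone_frames)

-- ===== LEMMAS AND PROOFS =====

-- the common middle form of one anchor's contribution: takeWhile over the suffix
def pvTW (p : Int × Int) (target_zone_frames : Int) (suf : List (Int × Int)) :
    List (Int × Int × Int) :=
  (suf.takeWhile (fun q => decide (q.1 ≤ p.1 + target_zone_frames))).map
    (fun q => (p.2, q.2, q.1 - p.1))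

-- A's inner scan-with-break is takeWhile-then-map
theorem pvInnerA_eq_tw (p : Int × Int) (tzf : Int) (suf : List (Int × Int)) :
    pvInnerA p.1 p.2 tzf suf = pvTW p tzf suf := by
  induction suf with
  | nil => rfl
  | cons q rest ih =>
      obtain ⟨t, f⟩ := q
      by_cases h : t - p.1 > tzf
      · simp [pvInnerA, pvTW, h, show ¬ (t ≤ p.1 + tzf) by omega]
      · rw [pvTW] at ih ⊢
        simp only [pvInnerA, if_neg h, List.takeWhile_cons,
          decide_eq_true_eq, if_pos (show t ≤ p.1 + tzf by omega), List.map_cons]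
        exact congrArg _ ih

-- takeWhile = take at a boundary that characterises the predicate positionally
theorem pvTakeWhile_eq_take {α : Type} (P : α → Bool) (m : List α) (b : Nat)
    (h : ∀ (j : Nat) (hj : j < m.length), P m[j] = true ↔ j < b) :
    m.takeWhile P = m.take b := by
  induction m generalizing b with
  | nil => simp
  | cons x xs ih =>
      cases b with
      | zero =>
          have hx : P x = false := by
            have := h 0 (by simp)
            simpa using by
              by_contra hc
              simp at hc
              exact absurd ((this).mp hc) (by omega)
          simp [List.takeWhile, hx]
      | succ b' =>
          have hx : P x = true := (h 0 (by simp)).mpr (by omega)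
          have := ih b' (fun j hj => by
            have := h (j+1) (by simpa using Nat.succ_lt_succ hj)
            simpa using this)
          simp [List.takeWhile, hx, this]

-- B's slice to the bisect boundary is the same takeWhile, on a time-sorted list
theorem pvSlice_eq_tw (sp : List (Int × Int)) (tzf : Int)
    (hs : (sp.map (fun p => p.1)).Pairwise (· ≤ ·))
    (i : Nat) (hi : i < sp.length) :
    PySem.List.slice sp (some ((i : Int) + 1))
        (some ((PySem.List.bisectRight (sp.map (fun p => p.1)) (sp[i].1 + tzf) : Nat) : Int)) =
      (sp.drop (i + 1)).takeWhile (fun q => decide (q.1 ≤ sp[i].1 + tzf)) := by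
  set X := sp[i].1 + tzf with hX
  set c := PySem.List.bisectRight (sp.map (fun p => p.1)) X with hc
  obtain ⟨hcle, hlt, hge⟩ := PySem.List.bisectRight_spec (sp.map (fun p => p.1)) X hs
  have hcast : ((i : Int) + 1) = ((i + 1 : Nat) : Int) := by push_cast; ring
  rw [hcast, PySem.List.slice_natCast]
  symm
  apply pvTakeWhile_eq_take
  intro j hj
  have hlen : (i + 1) + j < sp.length := by
    have := List.length_drop (l := sp) (i := i + 1)
    omega
  have hidx : (sp.drop (i + 1))[j] = sp[(i + 1) + j] := by
    simp [List.getElem_drop]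
  have htimes : (sp.map (fun p => p.1))[(i + 1) + j]'(by simpa using hlen) = sp[(i + 1) + j].1 := by
    simp
  constructor
  · intro hP
    by_contra hcon
    have hcj : c ≤ (i + 1) + j := by omega
    have := hge ((i + 1) + j) (by simpa using hlen) hcj
    rw [htimes] at this
    rw [hidx] at hP
    simp at hP
    omega
  · intro hjb
    have := hlt ((i + 1) + j) (by simpa using hlen) (by omega)
    rw [htimes] at this
    rw [hidx]
    simpa using this

-- A's double loop as a flatMap of middle forms over enumerate (generalised start)
theorem pvOuterA_eq_flat (tzf : Int) (l : List (Int × Int)) (s : Int) (hs : 0 ≤ s) :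
    pvOuterA tzf l =
      (PySem.List.enumerate l s).flatMap
        (fun ip => pvTW ip.2 tzf (l.drop ((ip.1 - s).toNat + 1))) := by
  induction l generalizing s with
  | nil => simp [pvOuterA, PySem.List.enumerate_nil]
  | cons p rest ih =>
      obtain ⟨at_, af⟩ := p
      rw [PySem.List.enumerate_cons]
      simp only [List.flatMap_cons]
      have h0 : ((s - s).toNat + 1) = 1 := by omega
      rw [h0]
      simp only [List.drop_one, List.tail_cons]
      have hrest : (PySem.List.enumerate rest (s + 1)).flatMap
          (fun ip => pvTW ip.2 tzf (((at_, af) :: rest).drop ((ip.1 - s).toNat + 1))) =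
          (PySem.List.enumerate rest (s + 1)).flatMap
          (fun ip => pvTW ip.2 tzf (rest.drop ((ip.1 - (s + 1)).toNat + 1))) := by
        apply List.flatMap_congr
        intro ip hip
        obtain ⟨k, hk, hipe⟩ := (PySem.List.mem_enumerate_iff _ _ _).mp hip
        subst hipe
        have h1 : ((s + 1 + (k : Int) - s).toNat + 1) = (k + 1) + 1 := by omega
        have h2 : ((s + 1 + (k : Int) - (s + 1)).toNat + 1) = k + 1 := by omega
        rw [h1, h2]
        simp
      rw [hrest, ← ih (s + 1) (by omega), pvOuterA]
      rw [pvInnerA_eq_tw (at_, af) tzf rest]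

-- ===== VERDICT (by name: the statement is the Claim_ definition above) =====
theorem create_fingerprint_pairs_spec : Claim_equal_create_fingerprint_pairs := by
  intro fingerprint tzf _
  unfold Spec_create_fingerprint_pairs
  unfold create_fingerprint_pairs create_fingerprint_pairs_alt
  set sp := PySem.List.sorted fingerprint (fun x => x.1) false with hsp
  have hsorted : (sp.map (fun p => p.1)).Pairwise (· ≤ ·) := by
    have := PySem.List.sorted_pairwise (xs := fingerprint) (key := fun x => x.1)
    exact List.Pairwise.map _ (by intro a b h; exact h) this
  simp only [Prod.mk.injEq, and_true]
  rw [PySem.List.foldl_append_eq_flatMap]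
  simp only [List.nil_append]
  rw [pvOuterA_eq_flat tzf sp 0 le_rfl]
  apply List.flatMap_congr
  intro ip hip
  obtain ⟨k, hk, hipe⟩ := (PySem.List.mem_enumerate_iff _ _ _).mp hip
  subst hipe
  simp only [Int.zero_add, Int.sub_zero, Int.toNat_natCast]
  rw [pvSlice_eq_tw sp tzf hsorted k hk]
  rfl
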